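-- pv_equiv track=rewrite | github.com/Benjamin-VRB/IN200_Sudoku | Grille/Archive.py | trouver_groupes_horizontaux_kakuro
-- ===== SOURCE A (Python) =====
-- def trouver_groupes_horizontaux_kakuro(grille : list[list:int]):
--     groupes = []
--     dimension = len(grille)
--     for ligne in range(dimension):
--         groupe = []
--         for colonne in range(dimension):
--             if grille[ligne][colonne] == 0:
--                 groupe.append((ligne, colonne))
--             else:
--                 if len(groupe) >= 2:
--                     groupes.append(groupe)
--                 groupe = []
--         if len(groupe) >= 2:
--             groupes.append(groupe)
--     return groupes
-- ===== SOURCE B (Python) =====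
-- def _runs(ligne, c, vals):
--     """Chunk vals into maximal runs of equal values; keep the zero runs of length >= 2."""
--     if not vals:
--         return []
--     v = vals[0]
--     k = 1
--     while k < len(vals) and vals[k] == v:
--         k += 1
--     rest = _runs(ligne, c + k, vals[k:])
--     if v == 0 and k >= 2:
--         return [[(ligne, c + i) for i in range(k)]] + rest
--     return rest
--
--
-- def trouver_groupes_horizontaux_kakuro(grille):
--     n = len(grille)
--     res = []
--     for ligne in range(n):
--         valeurs = [grille[ligne][c] for c in range(n)]
--         res.extend(_runs(ligne, 0, valeurs))
--     return res
-- ===== Notes on version B (the rewrite author's own statement) =====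
-- stated objective: alternative
-- what changed: Replaces A's running-accumulator loop that flushes a pending group on each nonzero cell with a chunk-into-maximal-runs recursion that splits each row's value list into runs of equal values and keeps the zero runs of length >= 2.
import Mathlib
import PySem

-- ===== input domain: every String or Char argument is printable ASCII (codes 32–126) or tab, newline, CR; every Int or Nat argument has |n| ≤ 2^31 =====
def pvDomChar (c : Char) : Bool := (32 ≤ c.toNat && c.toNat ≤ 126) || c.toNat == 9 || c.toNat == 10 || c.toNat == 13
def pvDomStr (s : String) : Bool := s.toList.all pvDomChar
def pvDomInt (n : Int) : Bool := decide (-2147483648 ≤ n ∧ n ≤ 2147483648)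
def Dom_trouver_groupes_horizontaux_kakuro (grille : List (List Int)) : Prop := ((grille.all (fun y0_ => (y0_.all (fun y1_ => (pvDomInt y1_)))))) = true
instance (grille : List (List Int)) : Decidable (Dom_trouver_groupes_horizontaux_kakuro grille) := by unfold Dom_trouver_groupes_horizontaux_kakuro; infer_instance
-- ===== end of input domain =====

-- B replaces A's running-accumulator/flush scan with a chunk-into-maximal-runs recursion per row (alternative decomposition, same cost).


-- ===== PORT A =====
def trouver_groupes_horizontaux_kakuro (grille : List (List Int)) : List (List (Int × Int)) :=
  let dimension : Int := grille.length
  (PySem.List.pyRange 0 dimension 1).foldl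
    (fun groupes ligne =>
      let st :=
        (PySem.List.pyRange 0 dimension 1).foldl
          (fun (st : List (List (Int × Int)) × List (Int × Int)) colonne =>
            if PySem.List.pyGetD (PySem.List.pyGetD grille ligne []) colonne 1 = 0 then
              (st.1, st.2 ++ [(ligne, colonne)])
            else
              ((if 2 ≤ st.2.length then st.1 ++ [st.2] else st.1), []))
          (groupes, [])
      if 2 ≤ st.2.length then st.1 ++ [st.2] else st.1)
    []

-- ===== PORT B =====
-- port of Source B's _runs: chunk the value list into maximal runs of equal values,
-- keep the zero runs of length ≥ 2 (vals[k:] with k = 1 + length of the equal prefix = dropWhile)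
def pvRuns (ligne : Int) (c : Int) : List Int → List (List (Int × Int))
  | [] => []
  | v :: rest =>
    let k : Nat := (rest.takeWhile (fun x => x == v)).length + 1
    let tail := pvRuns ligne (c + (k : Int)) (rest.dropWhile (fun x => x == v))
    if v = 0 ∧ 2 ≤ k then ((List.range k).map (fun (i : Nat) => (ligne, c + (i : Int)))) :: tail else tail
  termination_by vals => vals.length
  decreasing_by
    have := List.length_dropWhile_le (fun x => x == v) rest
    simp; omega

def trouver_groupes_horizontaux_kakuro_alt (grille : List (List Int)) : List (List (Int × Int)) :=
  let n : Int := grille.length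
  (PySem.List.pyRange 0 n 1).foldl
    (fun res ligne =>
      let valeurs := (PySem.List.pyRange 0 n 1).map
        (fun c => PySem.List.pyGetD (PySem.List.pyGetD grille ligne []) c 1)
      res ++ pvRuns ligne 0 valeurs)
    []

-- ===== PRECONDITION & SPEC =====
-- Pre_ excludes exactly the grids with a row shorter than the number of rows: there
-- grille[ligne][colonne] raises IndexError in A (and in B's row-comprehension alike).
def Pre_trouver_groupes_horizontaux_kakuro (grille : List (List Int)) : Prop :=
  ∀ row ∈ grille, grille.length ≤ row.length
instance (grille : List (List Int)) : Decidable (Pre_trouver_groupes_horizontaux_kakuro grille) := by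
  unfold Pre_trouver_groupes_horizontaux_kakuro; infer_instance
def pvWitness_trouver_groupes_horizontaux_kakuro : List (List Int) :=
  [[0, 0, 5], [1, 0, 0], [0, 0, 0]]
def Spec_trouver_groupes_horizontaux_kakuro (grille : List (List Int)) (out : List (List (Int × Int))) : Prop := out = trouver_groupes_horizontaux_kakuro_alt grille
instance (grille : List (List Int)) (out : List (List (Int × Int))) : Decidable (Spec_trouver_groupes_horizontaux_kakuro grille out) := by unfold Spec_trouver_groupes_horizontaux_kakuro; infer_instance

-- ===== CLAIM (what is proved, stated in full; the proofs are below) =====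
def Claim_equal_trouver_groupes_horizontaux_kakuro : Prop := ∀ (grille : List (List Int)), Dom_trouver_groupes_horizontaux_kakuro grille → Pre_trouver_groupes_horizontaux_kakuro grille → Spec_trouver_groupes_horizontaux_kakuro grille (trouver_groupes_horizontaux_kakuro grille)

-- ===== LEMMAS AND PROOFS =====

-- abstraction of A's inner row loop: pending group g at current column c
def aRow (ligne : Int) (gs : List (List (Int × Int))) (g : List (Int × Int)) (c : Int) :
    List Int → List (List (Int × Int))
  | [] => if 2 ≤ g.length then gs ++ [g] else gs
  | v :: rest =>
    if v = 0 then aRow ligne gs (g ++ [(ligne, c)]) (c + 1) rest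
    else aRow ligne (if 2 ≤ g.length then gs ++ [g] else gs) [] (c + 1) rest

-- A's inner-loop step and the post-loop flush, as named helpers
def aStep (ligne : Int) (st : List (List (Int × Int)) × List (Int × Int)) (p : Int × Int) :
    List (List (Int × Int)) × List (Int × Int) :=
  if p.2 = 0 then (st.1, st.2 ++ [(ligne, p.1)])
  else ((if 2 ≤ st.2.length then st.1 ++ [st.2] else st.1), [])

def aFlush (st : List (List (Int × Int)) × List (Int × Int)) : List (List (Int × Int)) :=
  if 2 ≤ st.2.length then st.1 ++ [st.2] else st.1

-- A's inner fold over enumerate (plus the final flush) is aRow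
lemma bridgeA (vals : List Int) : ∀ (s ligne : Int) (gs : List (List (Int × Int))) (g : List (Int × Int)),
    aFlush ((PySem.List.enumerate vals s).foldl (aStep ligne) (gs, g)) = aRow ligne gs g s vals := by
  induction vals with
  | nil => intro s ligne gs g; simp [PySem.List.enumerate_nil, aFlush, aRow]
  | cons v rest ih =>
    intro s ligne gs g
    rw [PySem.List.enumerate_cons, List.foldl_cons]
    by_cases hv : v = 0 <;> simp only [aStep, aRow, hv, ite_false, if_pos] <;>
      [exact ih (s + 1) ligne gs (g ++ [(ligne, s)]); exact ih (s + 1) ligne _ []]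

-- zero chunk absorption
lemma aRow_zeros (k : Nat) : ∀ (rest : List Int) (ligne c : Int) gs g,
    aRow ligne gs g c (List.replicate k 0 ++ rest)
      = aRow ligne gs (g ++ (List.range k).map (fun (i : Nat) => (ligne, c + (i : Int)))) (c + (k : Int)) rest := by
  induction k with
  | zero => intro rest ligne c gs g; simp
  | succ k ih =>
    intro rest ligne c gs g
    rw [List.replicate_succ, List.cons_append]
    show aRow ligne gs (g ++ [(ligne, c)]) (c + 1) (List.replicate k 0 ++ rest) = _
    rw [ih]
    have hm : (List.range (k + 1)).map (fun (i : Nat) => (ligne, c + (i : Int)))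
        = (ligne, c) :: (List.range k).map (fun (i : Nat) => (ligne, c + 1 + (i : Int))) := by
      rw [List.range_succ_eq_map]
      simp only [List.map_cons, List.map_map]
      congr 1
      · simp
      · apply List.map_congr_left; intro i _
        simp only [Function.comp_apply, Prod.mk.injEq, true_and]
        push_cast; ring
    rw [hm]
    congr 1
    · simp
    · push_cast; ring

-- nonzero chunk skip
lemma aRow_nonzeros (k : Nat) : ∀ (v : Int), v ≠ 0 → ∀ (rest : List Int) (ligne c : Int) gs,
    aRow ligne gs [] c (List.replicate k v ++ rest) = aRow ligne gs [] (c + (k : Int)) rest := by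
  induction k with
  | zero => intro v _ rest ligne c gs; simp
  | succ k ih =>
    intro v hv rest ligne c gs
    rw [List.replicate_succ, List.cons_append]
    show aRow ligne gs [] c (v :: (List.replicate k v ++ rest)) = _
    rw [aRow, if_neg hv]
    simp only [List.length_nil]
    rw [if_neg (by omega)]
    rw [ih v hv]
    congr 1; push_cast; ring

-- chunk shape facts about takeWhile/dropWhile
lemma takeWhile_eq_replicate (rest : List Int) (v : Int) :
    rest.takeWhile (fun x => x == v)
      = List.replicate (rest.takeWhile (fun x => x == v)).length v := by
  apply List.eq_replicate_of_mem
  intro x hx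
  simpa using List.mem_takeWhile_imp hx

lemma dropWhile_head_ne (rest : List Int) (v w : Int) (t : List Int)
    (h : rest.dropWhile (fun x => x == v) = w :: t) : w ≠ v := by
  have := List.head_dropWhile_not (fun x => x == v) (l := rest) (by simp [h])
  simpa [h] using this

-- main row lemma: aRow with empty pending is gs ++ pvRuns
lemma aRow_eq_pvRuns_aux (N : Nat) : ∀ (vals : List Int), vals.length ≤ N → ∀ (ligne c : Int) gs,
    aRow ligne gs [] c vals = gs ++ pvRuns ligne c vals := by
  induction N with
  | zero =>
    intro vals hlen ligne c gs
    have : vals = [] := List.length_eq_zero_iff.mp (Nat.le_zero.mp hlen)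
    subst this; simp [aRow, pvRuns]
  | succ N ih =>
    intro vals hlen ligne c gs
    match vals with
    | [] => simp [aRow, pvRuns]
    | v :: rest =>
      have hruns : pvRuns ligne c (v :: rest)
          = if v = 0 ∧ 2 ≤ (rest.takeWhile (fun x => x == v)).length + 1 then
              ((List.range ((rest.takeWhile (fun x => x == v)).length + 1)).map
                  (fun (i : Nat) => (ligne, c + (i : Int))))
                :: pvRuns ligne (c + (((rest.takeWhile (fun x => x == v)).length + 1 : Nat) : Int))
                    (rest.dropWhile (fun x => x == v))
            else pvRuns ligne (c + (((rest.takeWhile (fun x => x == v)).length + 1 : Nat) : Int))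
                    (rest.dropWhile (fun x => x == v)) := by
        rw [pvRuns]
      rw [hruns]
      obtain ⟨zk, hzk⟩ : ∃ z, (rest.takeWhile (fun x => x == v)).length = z := ⟨_, rfl⟩
      obtain ⟨rest', hdw⟩ : ∃ r, rest.dropWhile (fun x => x == v) = r := ⟨_, rfl⟩
      rw [hzk, hdw]
      have hchunk : v :: rest = List.replicate (zk + 1) v ++ rest' := by
        rw [List.replicate_succ, List.cons_append]
        nth_rewrite 1 [(List.takeWhile_append_dropWhile
          (p := fun x => x == v) (l := rest)).symm]
        rw [takeWhile_eq_replicate rest v, hzk, hdw]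
      have hlenr' : rest'.length ≤ N := by
        have h := List.length_dropWhile_le (fun x => x == v) rest
        rw [hdw] at h
        have : rest.length ≤ N := by simpa using hlen
        omega
      by_cases hv : v = 0
      · subst hv
        rw [hchunk, aRow_zeros]
        simp only [List.nil_append]
        have hrunlen : ((List.range (zk + 1)).map
            (fun (i : Nat) => (ligne, c + (i : Int)))).length = zk + 1 := by simp
        by_cases h2 : 2 ≤ zk + 1
        · rw [if_pos (show _ ∧ 2 ≤ zk + 1 by simp [h2])]
          rcases hr : rest' with _ | ⟨w, t⟩
          · subst hr; rw [pvRuns]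
            show (if 2 ≤ _ then _ else _) = _
            rw [hrunlen, if_pos h2]
          · have hw : w ≠ 0 := dropWhile_head_ne rest 0 w t (hdw.trans hr)
            subst hr
            rw [aRow, if_neg hw, hrunlen, if_pos h2]
            have hstep : aRow ligne (gs ++ [(List.range (zk + 1)).map
                  (fun (i : Nat) => (ligne, c + (i : Int)))]) []
                  (c + ((zk + 1 : Nat) : Int)) (w :: t)
                = aRow ligne (gs ++ [(List.range (zk + 1)).map
                  (fun (i : Nat) => (ligne, c + (i : Int)))]) []
                  (c + ((zk + 1 : Nat) : Int) + 1) t := by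
              rw [aRow, if_neg hw]; simp
            have h1 := ih (w :: t) hlenr' ligne (c + ((zk + 1 : Nat) : Int))
              (gs ++ [(List.range (zk + 1)).map (fun (i : Nat) => (ligne, c + (i : Int)))])
            rw [hstep] at h1
            rw [h1]; simp
        · rw [if_neg (by tauto)]
          rcases hr : rest' with _ | ⟨w, t⟩
          · subst hr; rw [pvRuns]
            show (if 2 ≤ _ then _ else _) = _
            rw [hrunlen, if_neg h2]; simp
          · have hw : w ≠ 0 := dropWhile_head_ne rest 0 w t (hdw.trans hr)
            subst hr
            rw [aRow, if_neg hw, hrunlen, if_neg h2]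
            have hstep : aRow ligne gs [] (c + ((zk + 1 : Nat) : Int)) (w :: t)
                = aRow ligne gs [] (c + ((zk + 1 : Nat) : Int) + 1) t := by
              rw [aRow, if_neg hw]; simp
            have h1 := ih (w :: t) hlenr' ligne (c + ((zk + 1 : Nat) : Int)) gs
            rw [hstep] at h1
            exact h1
      · rw [if_neg (by tauto), hchunk, aRow_nonzeros (zk + 1) v hv]
        exact ih rest' hlenr' ligne (c + ((zk + 1 : Nat) : Int)) gs

lemma aRow_eq_pvRuns (vals : List Int) (ligne c : Int) (gs : List (List (Int × Int))) :
    aRow ligne gs [] c vals = gs ++ pvRuns ligne c vals :=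
  aRow_eq_pvRuns_aux vals.length vals le_rfl ligne c gs

-- the B-side value list is row.take n
lemma valsB_eq_take (row : List Int) (n : Nat) (h : n ≤ row.length) :
    (PySem.List.pyRange 0 (n : Int) 1).map (fun c => PySem.List.pyGetD row c 1) = row.take n := by
  apply List.ext_getElem
  · simpa [PySem.List.length_pyRange_one] using h
  · intro i h1 h2
    have hi : i < n := by simpa [PySem.List.length_pyRange_one] using h1
    simp only [List.getElem_map, List.getElem_take, PySem.List.getElem_pyRange_one]
    rw [show (0 : Int) + (i : Int) = ((i : Nat) : Int) by ring]
    exact PySem.List.pyGetD_ofNat row i 1 (by omega)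

-- ===== VERDICT (by name: the statement is the Claim_ definition above) =====
lemma row_body_eq (grille : List (List Int)) (k : Nat) (hk : k < grille.length)
    (hpre : grille.length ≤ grille[k].length) (acc : List (List (Int × Int))) :
    aFlush ((PySem.List.pyRange 0 (grille.length : Int) 1).foldl
        (fun st colonne => aStep (k : Int) st
          (colonne, PySem.List.pyGetD (grille[k]) colonne 1)) (acc, []))
      = acc ++ pvRuns (k : Int) 0 (grille[k].take grille.length) := by
  have hvlen : (grille[k].take grille.length).length = grille.length := by
    simp [Nat.min_eq_left hpre]
  have hcongr : ∀ colonne ∈ PySem.List.pyRange 0 (grille.length : Int) 1,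
      ∀ st, aStep (k : Int) st (colonne, PySem.List.pyGetD (grille[k]) colonne 1)
        = aStep (k : Int) st (colonne, PySem.List.pyGetD (grille[k].take grille.length) colonne 1) := by
    intro colonne hc st
    obtain ⟨h0, hlt⟩ := (PySem.List.mem_pyRange_one).mp hc
    obtain ⟨m, rfl⟩ : ∃ m : Nat, colonne = (m : Int) := ⟨colonne.toNat, (Int.toNat_of_nonneg h0).symm⟩
    have hm : m < grille.length := by exact_mod_cast hlt
    rw [PySem.List.pyGetD_ofNat _ m _ (by omega), PySem.List.pyGetD_ofNat _ m _ (by omega)]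
    rw [List.getElem_take]
  rw [PySem.List.foldl_congr_mem' _ _ _ (acc, ([] : List (Int × Int))) hcongr]
  have henum : PySem.List.enumerate (grille[k].take grille.length) 0
      = (PySem.List.pyRange 0 (grille.length : Int) 1).map
          (fun j => (j, PySem.List.pyGetD (grille[k].take grille.length) j 1)) := by
    rw [PySem.List.enumerate_eq_map_pyRange (d := 1)]
    simp [hvlen]
  rw [show (PySem.List.pyRange 0 (grille.length : Int) 1).foldl
        (fun st colonne => aStep (k : Int) st
          (colonne, PySem.List.pyGetD (grille[k].take grille.length) colonne 1)) (acc, [])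
      = ((PySem.List.pyRange 0 (grille.length : Int) 1).map
          (fun j => (j, PySem.List.pyGetD (grille[k].take grille.length) j 1))).foldl
          (aStep (k : Int)) (acc, []) from List.foldl_map.symm]
  rw [← henum, bridgeA, aRow_eq_pvRuns]

theorem trouver_groupes_horizontaux_kakuro_spec : Claim_equal_trouver_groupes_horizontaux_kakuro := by
  intro grille _hdom hpre
  show trouver_groupes_horizontaux_kakuro grille = trouver_groupes_horizontaux_kakuro_alt grille
  unfold trouver_groupes_horizontaux_kakuro trouver_groupes_horizontaux_kakuro_alt
  apply PySem.List.foldl_congr_mem' _ _ _ _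
  intro ligne hmem acc
  obtain ⟨h0, hlt⟩ := (PySem.List.mem_pyRange_one).mp hmem
  obtain ⟨k, rfl⟩ : ∃ k : Nat, ligne = (k : Int) := ⟨ligne.toNat, (Int.toNat_of_nonneg h0).symm⟩
  have hk : k < grille.length := by exact_mod_cast hlt
  have hrow : PySem.List.pyGetD grille (k : Int) [] = grille[k] :=
    PySem.List.pyGetD_ofNat _ k _ hk
  have hpre' : grille.length ≤ grille[k].length := hpre _ (List.getElem_mem hk)
  simp only [hrow, valsB_eq_take (grille[k]) grille.length hpre']
  exact row_body_eq grille k hk hpre' acc
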